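-- pv_equiv track=rewrite | github.com/wzdnzd/ai-collector | cmd/search.py | parse_chars
-- ===== SOURCE A (Python) =====
-- def parse_chars(classes: str) -> set[str]:
--     """
--     Parse character class like 'a-zA-Z0-9_\\-' and return set of characters.
--     Note: GitHub search is case-insensitive, so [a-zA-Z] only gives 26 possibilities.
--     """
--     chars = set()
--     i = 0
--     while i < len(classes):
--         if i + 2 < len(classes) and classes[i + 1] == "-":
--             # Handle ranges like a-z, A-Z, 0-9
--             start = classes[i]
--             end = classes[i + 2]
--
--             # For GitHub case-insensitive search, treat A-Z same as a-z
--             if start.isupper() and end.isupper():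
--                 start = start.lower()
--                 end = end.lower()
--             elif start.islower() and end.isupper():
--                 # Mixed case range, convert to lowercase
--                 end = end.lower()
--             elif start.isupper() and end.islower():
--                 start = start.lower()
--
--             for c in range(ord(start), ord(end) + 1):
--                 chars.add(chr(c))
--             i += 3
--         else:
--             # Single character or escaped character
--             char = classes[i]
--             if char == "\\" and i + 1 < len(classes):
--                 # Handle escaped characters like \-
--                 escaped = classes[i + 1]
--                 # Convert uppercase to lowercase for GitHub case-insensitive search
--                 if escaped.isupper():
--                     escaped = escaped.lower()
--                 chars.add(escaped)
--                 i += 2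
--             else:
--                 # Convert uppercase to lowercase for GitHub case-insensitive search
--                 if char.isupper():
--                     char = char.lower()
--                 chars.add(char)
--                 i += 1
--
--     return chars
-- ===== SOURCE B (Python) =====
-- def parse_chars(classes: str) -> set[str]:
--     def low_if(c, other):
--         # an endpoint is lowercased iff it is uppercase and the other endpoint is a letter
--         return c.lower() if c.isupper() and other.isalpha() else c
--
--     # phase 1: tokenize into (char, range-end-or-None) tokens; ranges take priority over escapes
--     tokens = []
--     i, n = 0, len(classes)
--     while i < n:
--         if i + 2 < n and classes[i + 1] == "-":
--             tokens.append((classes[i], classes[i + 2]))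
--             i += 3
--         elif classes[i] == "\\" and i + 1 < n:
--             tokens.append((classes[i + 1], None))
--             i += 2
--         else:
--             tokens.append((classes[i], None))
--             i += 1
--
--     # phase 2: expand tokens into the character set
--     out = set()
--     for a, b in tokens:
--         if b is None:
--             out.add(low_if(a, a))
--         else:
--             out.update(chr(c) for c in range(ord(low_if(a, b)), ord(low_if(b, a)) + 1))
--     return out
-- ===== Notes on version B (the rewrite author's own statement) =====
-- stated objective: alternative
-- what changed: Replaces A's single while/index state machine (inline three-branch endpoint case analysis, per-char set.add) by a two-phase pass: tokenize into (char, optional range end) tokens, then expand tokens with one symmetric rule (an endpoint is lowercased iff it is uppercase and the other endpoint is a letter) using set.update over a range generator.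
import Mathlib
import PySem

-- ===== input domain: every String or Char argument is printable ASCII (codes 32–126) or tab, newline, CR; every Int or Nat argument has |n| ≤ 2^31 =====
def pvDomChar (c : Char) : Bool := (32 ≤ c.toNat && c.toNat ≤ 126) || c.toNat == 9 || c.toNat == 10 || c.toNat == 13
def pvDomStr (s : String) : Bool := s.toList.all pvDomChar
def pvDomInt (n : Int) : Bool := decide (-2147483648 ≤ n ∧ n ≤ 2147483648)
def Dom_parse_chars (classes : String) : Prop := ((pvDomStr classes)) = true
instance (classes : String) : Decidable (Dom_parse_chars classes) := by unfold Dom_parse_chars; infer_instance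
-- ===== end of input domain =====

-- B replaces A's single while/index state machine by a two-phase pass (tokenize, then expand)
-- with one symmetric endpoint-lowercasing rule instead of A's three-branch case analysis (objective: alternative).

-- ===== PORT A =====
-- A's inline 'if char.isupper(): char = char.lower()'
def pvLowA (c : Char) : Char :=
  if PySem.Chars.isupper c then PySem.Chars.lowerChar c else c

-- A's while loop over the remaining characters, with the set accumulator
def pvLoopA : List Char → PySem.Set String → PySem.Set String
  | [], chars => chars
  | a :: m :: b :: rest, chars =>
    if m = '-' then
      let p : Char × Char :=
        if PySem.Chars.isupper a && PySem.Chars.isupper b then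
          (PySem.Chars.lowerChar a, PySem.Chars.lowerChar b)
        else if PySem.Chars.islower a && PySem.Chars.isupper b then
          (a, PySem.Chars.lowerChar b)
        else if PySem.Chars.isupper a && PySem.Chars.islower b then
          (PySem.Chars.lowerChar a, b)
        else (a, b)
      pvLoopA rest ((PySem.List.pyRange (p.1.toNat : Int) ((p.2.toNat : Int) + 1) 1).foldl
        (fun acc c => acc.add (Char.ofNat c.toNat).toString) chars)
    else if a = '\\' then
      pvLoopA (b :: rest) (chars.add (pvLowA m).toString)
    else
      pvLoopA (m :: b :: rest) (chars.add (pvLowA a).toString)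
  | [a, m], chars =>
    if a = '\\' then chars.add (pvLowA m).toString
    else pvLoopA [m] (chars.add (pvLowA a).toString)
  | [a], chars => chars.add (pvLowA a).toString

def parse_chars (classes : String) : List String :=
  pvLoopA classes.toList PySem.Set.empty

-- ===== PORT B =====
-- B's low_if: lowercase iff uppercase and the other endpoint is a letter
def pvLowIf (c other : Char) : Char :=
  if PySem.Chars.isupper c && PySem.Chars.isalpha other then PySem.Chars.lowerChar c else c

-- B's phase 1: tokenize into (char, optional range end) tokens
def pvTokens : List Char → List (Char × Option Char)
  | a :: m :: b :: rest =>
    if m = '-' then (a, some b) :: pvTokens rest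
    else if a = '\\' then (m, none) :: pvTokens (b :: rest)
    else (a, none) :: pvTokens (m :: b :: rest)
  | [a, m] => if a = '\\' then [(m, none)] else (a, none) :: pvTokens [m]
  | [a] => [(a, none)]
  | [] => []

-- B's phase-2 loop body
def pvStepB (out : PySem.Set String) (t : Char × Option Char) : PySem.Set String :=
  match t.2 with
  | none => out.add (pvLowIf t.1 t.1).toString
  | some b =>
    out.update ((PySem.List.pyRange ((pvLowIf t.1 b).toNat : Int)
        (((pvLowIf b t.1).toNat : Int) + 1) 1).map (fun c => (Char.ofNat c.toNat).toString))

def parse_chars_alt (classes : String) : List String :=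
  (pvTokens classes.toList).foldl pvStepB PySem.Set.empty

-- ===== PRECONDITION & SPEC =====
def Spec_parse_chars (classes : String) (out : List String) : Prop := out = parse_chars_alt classes
instance (classes : String) (out : List String) : Decidable (Spec_parse_chars classes out) := by unfold Spec_parse_chars; infer_instance

-- ===== CLAIM (what is proved, stated in full; the proofs are below) =====
def Claim_equal_parse_chars : Prop := ∀ (classes : String), Dom_parse_chars classes → Spec_parse_chars classes (parse_chars classes)

-- ===== LEMMAS AND PROOFS =====
theorem pv_upper_not_lower (c : Char) (h : PySem.Chars.isupper c = true) :
    PySem.Chars.islower c = false := by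
  simp only [PySem.Chars.isupper, Bool.and_eq_true, decide_eq_true_eq] at h
  simp only [PySem.Chars.islower, Bool.and_eq_false_iff, decide_eq_false_iff_not]
  exact Or.inl (fun hc => absurd (le_trans hc h.2) (by decide))

theorem pvLowIf_self (c : Char) : pvLowIf c c = pvLowA c := by
  by_cases h : PySem.Chars.isupper c = true <;>
    simp [pvLowIf, pvLowA, PySem.Chars.isalpha, h]

theorem pv_norm_eq (a b : Char) :
    (if PySem.Chars.isupper a && PySem.Chars.isupper b then
        (PySem.Chars.lowerChar a, PySem.Chars.lowerChar b)
      else if PySem.Chars.islower a && PySem.Chars.isupper b then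
        (a, PySem.Chars.lowerChar b)
      else if PySem.Chars.isupper a && PySem.Chars.islower b then
        (PySem.Chars.lowerChar a, b)
      else (a, b)) = (pvLowIf a b, pvLowIf b a) := by
  by_cases ha : PySem.Chars.isupper a = true <;>
    by_cases hb : PySem.Chars.isupper b = true <;>
    by_cases ha' : PySem.Chars.islower a = true <;>
    by_cases hb' : PySem.Chars.islower b = true <;>
    first
      | exact absurd (ha'.symm.trans (pv_upper_not_lower a ha)) Bool.true_ne_false
      | exact absurd (hb'.symm.trans (pv_upper_not_lower b hb)) Bool.true_ne_false
      | simp [pvLowIf, PySem.Chars.isalpha, ha, hb, ha', hb']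

theorem pv_loop_eq (cs : List Char) (chars : PySem.Set String) :
    pvLoopA cs chars = (pvTokens cs).foldl pvStepB chars := by
  fun_induction pvLoopA cs chars with
  | case1 chars => simp [pvTokens]
  | case2 a b rest chars p ih =>
    have hp : p = (pvLowIf a b, pvLowIf b a) := pv_norm_eq a b
    rw [ih, hp]
    simp [pvTokens, pvStepB, PySem.Set.update_map_eq_foldl_add]
  | case3 m b rest chars h ih =>
    rw [ih]; simp [pvTokens, h, pvStepB, pvLowIf_self]
  | case4 a m b rest chars h1 h2 ih =>
    rw [ih]; simp [pvTokens, h1, h2, pvStepB, pvLowIf_self]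
  | case5 m chars =>
    simp [pvTokens, pvStepB, pvLowIf_self]
  | case6 a m chars h ih =>
    rw [ih]; simp [pvTokens, h, pvStepB, pvLowIf_self]
  | case7 a chars =>
    simp [pvTokens, pvStepB, pvLowIf_self]

-- ===== VERDICT (by name: the statement is the Claim_ definition above) =====
theorem parse_chars_spec : Claim_equal_parse_chars := by
  intro classes _
  unfold Spec_parse_chars parse_chars parse_chars_alt
  exact pv_loop_eq _ _
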